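-- pv_equiv track=rewrite | github.com/khiba-k/holbertonschool-Markdown2HTML | markdown2html.py | convert_unordered_lists
-- ===== SOURCE A (Python) =====
-- def convert_unordered_lists(markdown_text):
--     """Convert markdown unordered lists to HTML format."""
--     html_lines = []
--     in_list = False
--
--     for line in markdown_text.split("\n"):
--         stripped_line = line.strip()
--         if stripped_line.startswith("- "):
--             if not in_list:
--                 html_lines.append("<ul>")
--                 in_list = True
--             content = stripped_line[2:].strip()
--             html_lines.append(f"<li>{content}</li>")
--         else:
--             if in_list:
--                 html_lines.append("</ul>")
--                 in_list = False
--             html_lines.append(line)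
--
--     if in_list:
--         html_lines.append("</ul>")
--
--     return "\n".join(html_lines)
-- ===== SOURCE B (Python) =====
-- def convert_unordered_lists(markdown_text):
--     """Convert markdown unordered lists to HTML format."""
--     lines = markdown_text.split("\n")
--     flags = [line.strip().startswith("- ") for line in lines]
--     out = []
--     for line, flag, prev, nxt in zip(lines, flags, [False] + flags, flags[1:] + [False]):
--         if flag:
--             if not prev:
--                 out.append("<ul>")
--             out.append("<li>" + line.strip()[2:].strip() + "</li>")
--             if not nxt:
--                 out.append("</ul>")
--         else:
--             out.append(line)
--     return "\n".join(out)
-- ===== Notes on version B (the rewrite author's own statement) =====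
-- stated objective: alternative
-- what changed: Replaces A's in_list state machine (with its post-loop </ul> fixup) by precomputing each line's item flag and zipping every line with its own, previous and next flags, so each line is rendered by a stateless rule that opens <ul> when the previous flag is off and closes </ul> when the next flag is off.
import Mathlib
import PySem

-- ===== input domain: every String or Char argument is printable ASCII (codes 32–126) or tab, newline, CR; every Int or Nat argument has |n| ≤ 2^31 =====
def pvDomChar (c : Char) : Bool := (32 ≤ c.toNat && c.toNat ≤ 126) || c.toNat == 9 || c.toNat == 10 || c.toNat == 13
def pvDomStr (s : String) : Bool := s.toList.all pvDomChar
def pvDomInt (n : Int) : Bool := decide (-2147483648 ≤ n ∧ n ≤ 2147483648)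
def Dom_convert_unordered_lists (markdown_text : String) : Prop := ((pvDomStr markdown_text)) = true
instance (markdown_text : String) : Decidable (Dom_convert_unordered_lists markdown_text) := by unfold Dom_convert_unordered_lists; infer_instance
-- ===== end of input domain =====

-- B replaces A's in_list state machine (with its post-loop fixup) by a stateless pass over each
-- line zipped with its precomputed neighbour flags; alternative decomposition, no speed claim.

-- ===== PORT A =====
def convert_unordered_lists (markdown_text : String) : String :=
  let step := fun (st : List String × Bool) (line : String) =>
    let stripped := PySem.Str.strip line
    if PySem.Str.startswith stripped "- " then
      let st1 := if !st.2 then (st.1 ++ ["<ul>"], true) else st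
      (st1.1 ++ ["<li>" ++ PySem.Str.strip (PySem.Str.slice stripped (some 2) none) ++ "</li>"], st1.2)
    else
      let st1 := if st.2 then (st.1 ++ ["</ul>"], false) else st
      (st1.1 ++ [line], st1.2)
  let res := ((PySem.Str.split? markdown_text "\n").getD []).foldl step ([], false)
  PySem.Str.join "\n" (if res.2 then res.1 ++ ["</ul>"] else res.1)

-- ===== PORT B =====
def convert_unordered_lists_alt (markdown_text : String) : String :=
  let lines := (PySem.Str.split? markdown_text "\n").getD []
  let flags := lines.map (fun line => PySem.Str.startswith (PySem.Str.strip line) "- ")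
  let quads := lines.zip (flags.zip ((false :: flags).zip (flags.drop 1 ++ [false])))
  let out := quads.foldl
    (fun out q =>
      if q.2.1 then
        (if !q.2.2.1 then out ++ ["<ul>"] else out)
          ++ ["<li>" ++ PySem.Str.strip (PySem.Str.slice (PySem.Str.strip q.1) (some 2) none) ++ "</li>"]
          ++ (if !q.2.2.2 then ["</ul>"] else [])
      else out ++ [q.1]) []
  PySem.Str.join "\n" out

-- ===== PRECONDITION & SPEC =====
def Spec_convert_unordered_lists (markdown_text : String) (out : String) : Prop := out = convert_unordered_lists_alt markdown_text
instance (markdown_text : String) (out : String) : Decidable (Spec_convert_unordered_lists markdown_text out) := by unfold Spec_convert_unordered_lists; infer_instance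

-- ===== CLAIM (what is proved, stated in full; the proofs are below) =====
def Claim_equal_convert_unordered_lists : Prop := ∀ (markdown_text : String), Dom_convert_unordered_lists markdown_text → Spec_convert_unordered_lists markdown_text (convert_unordered_lists markdown_text)

-- ===== LEMMAS AND PROOFS =====

/-- is this line a list item? -/
def pvItem (l : String) : Bool := PySem.Str.startswith (PySem.Str.strip l) "- "

/-- the rendered `<li>` element of a line -/
def pvLi (l : String) : String :=
  "<li>" ++ PySem.Str.strip (PySem.Str.slice (PySem.Str.strip l) (some 2) none) ++ "</li>"

/-- flag of the first line of a block, `false` for the empty block -/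
def pvHeadFlag : List String → Bool
  | [] => false
  | l :: _ => pvItem l

/-- the lines A's loop emits from `ls` with incoming state `b`, closing tag included -/
def aEmit : List String → Bool → List String
  | [], b => if b then ["</ul>"] else []
  | l :: ls, b =>
    if pvItem l then
      (if !b then ["<ul>"] else []) ++ [pvLi l] ++ aEmit ls true
    else
      (if b then ["</ul>"] else []) ++ [l] ++ aEmit ls false

/-- the lines B emits from `ls` when the preceding line's flag is `b` -/
def bEmit : List String → Bool → List String
  | [], _ => []
  | l :: ls, b =>
    (if pvItem l then
      (if !b then ["<ul>"] else []) ++ [pvLi l] ++ (if !pvHeadFlag ls then ["</ul>"] else [])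
    else [l]) ++ bEmit ls (pvItem l)

def pvStep (st : List String × Bool) (line : String) : List String × Bool :=
  let stripped := PySem.Str.strip line
  if PySem.Str.startswith stripped "- " then
    let st1 := if !st.2 then (st.1 ++ ["<ul>"], true) else st
    (st1.1 ++ ["<li>" ++ PySem.Str.strip (PySem.Str.slice stripped (some 2) none) ++ "</li>"], st1.2)
  else
    let st1 := if st.2 then (st.1 ++ ["</ul>"], false) else st
    (st1.1 ++ [line], st1.2)

theorem aFold_eq_aEmit (ls : List String) (acc : List String) (b : Bool) :
    (if (ls.foldl pvStep (acc, b)).2 then (ls.foldl pvStep (acc, b)).1 ++ ["</ul>"]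
      else (ls.foldl pvStep (acc, b)).1) = acc ++ aEmit ls b := by
  induction ls generalizing acc b with
  | nil => cases b <;> simp [aEmit]
  | cons l ls ih =>
    by_cases h : pvItem l = true
    · cases b <;> simp [aEmit, pvStep, pvItem, pvLi, ih] at * <;> simp [h]
    · cases b <;> simp [aEmit, pvStep, pvItem, pvLi, ih] at * <;> simp [h]

theorem quads_cons (l : String) (ls : List String) (b : Bool) :
    (l :: ls).zip ((((l :: ls).map pvItem)).zip
        ((b :: ((l :: ls).map pvItem)).zip (((l :: ls).map pvItem).drop 1 ++ [false]))) =
      (l, pvItem l, b, pvHeadFlag ls) ::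
        ls.zip ((ls.map pvItem).zip ((pvItem l :: ls.map pvItem).zip ((ls.map pvItem).drop 1 ++ [false]))) := by
  cases ls <;> simp [pvHeadFlag]

theorem bFold_eq_bEmit (ls : List String) (acc : List String) (b : Bool) :
    (ls.zip ((ls.map pvItem).zip ((b :: ls.map pvItem).zip ((ls.map pvItem).drop 1 ++ [false])))).foldl
      (fun out (q : String × Bool × Bool × Bool) =>
        if q.2.1 then
          (if !q.2.2.1 then out ++ ["<ul>"] else out)
            ++ ["<li>" ++ PySem.Str.strip (PySem.Str.slice (PySem.Str.strip q.1) (some 2) none) ++ "</li>"]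
            ++ (if !q.2.2.2 then ["</ul>"] else [])
        else out ++ [q.1]) acc = acc ++ bEmit ls b := by
  induction ls generalizing acc b with
  | nil => simp [bEmit]
  | cons l ls ih =>
    rw [quads_cons, List.foldl_cons]
    cases h : pvItem l <;> cases b <;>
      simp [bEmit, pvLi, h, List.drop_one] at ih ⊢ <;> simp [ih]

theorem aEmit_eq_bEmit (ls : List String) (b : Bool) :
    aEmit ls b = (if b && !pvHeadFlag ls then ["</ul>"] else []) ++ bEmit ls b := by
  induction ls generalizing b with
  | nil => cases b <;> simp [aEmit, bEmit, pvHeadFlag]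
  | cons l ls ih =>
    by_cases h : pvItem l = true <;> cases b <;>
      simp [aEmit, bEmit, pvHeadFlag, h, ih]

-- ===== VERDICT (by name: the statement is the Claim_ definition above) =====
theorem convert_unordered_lists_spec : Claim_equal_convert_unordered_lists := by
  intro s _
  show convert_unordered_lists s = convert_unordered_lists_alt s
  refine congrArg (PySem.Str.join "\n")
    (Eq.trans (Eq.trans (aFold_eq_aEmit ((PySem.Str.split? s "\n").getD []) [] false) ?_)
      (bFold_eq_bEmit ((PySem.Str.split? s "\n").getD []) [] false).symm)
  simp [aEmit_eq_bEmit]
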